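-- pv_equiv track=rewrite | github.com/XSLiuLab/TcrDesign | utils/parse_tcr.py | summrize_cdr
-- ===== SOURCE A (Python) =====
-- def summrize_cdr(TRA_results, TRB_results):
--     TRA_result_dict = {
--         'Acdr1': [], 'Acdr2': [], 'Acdr3': [], 'Aseq': []
--     }
--     TRB_result_dict = {
--         'Bcdr1': [], 'Bcdr2': [], 'Bcdr3': [], 'Bseq': []
--     }
--     for alpha_aa_list in TRA_results:
--         if alpha_aa_list is not None:
--             TRA_result_dict['Acdr1'].append(alpha_aa_list[0])
--             TRA_result_dict['Acdr2'].append(alpha_aa_list[1])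
--             TRA_result_dict['Acdr3'].append(alpha_aa_list[2])
--             TRA_result_dict['Aseq'].append(alpha_aa_list[3])
--         else:
--             TRA_result_dict['Acdr1'].append(None)
--             TRA_result_dict['Acdr2'].append(None)
--             TRA_result_dict['Acdr3'].append(None)
--             TRA_result_dict['Aseq'].append(None)
--     for beta_aa_list in TRB_results:
--         if beta_aa_list is not None:
--             TRB_result_dict['Bcdr1'].append(beta_aa_list[0])
--             TRB_result_dict['Bcdr2'].append(beta_aa_list[1])
--             TRB_result_dict['Bcdr3'].append(beta_aa_list[2])
--             TRB_result_dict['Bseq'].append(beta_aa_list[3])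
--         else:
--             TRB_result_dict['Bcdr1'].append(None)
--             TRB_result_dict['Bcdr2'].append(None)
--             TRB_result_dict['Bcdr3'].append(None)
--             TRB_result_dict['Bseq'].append(None)
--     return TRA_result_dict, TRB_result_dict
-- ===== SOURCE B (Python) =====
-- def summrize_cdr(TRA_results, TRB_results):
--     def columns(results):
--         rows = [(r[0], r[1], r[2], r[3]) if r is not None else (None, None, None, None)
--                 for r in results]
--         if rows:
--             return [list(c) for c in zip(*rows)]
--         return [[], [], [], []]
--     a1, a2, a3, a4 = columns(TRA_results)
--     b1, b2, b3, b4 = columns(TRB_results)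
--     return ({'Acdr1': a1, 'Acdr2': a2, 'Acdr3': a3, 'Aseq': a4},
--             {'Bcdr1': b1, 'Bcdr2': b2, 'Bcdr3': b3, 'Bseq': b4})
-- ===== Notes on version B (the rewrite author's own statement) =====
-- stated objective: alternative
-- what changed: Instead of appending element-by-element to four dict columns inside the loops, B normalizes each entry to a 4-tuple row and transposes all rows in one zip(*rows) pivot, then binds the four columns to the fixed keys.
import Mathlib
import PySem

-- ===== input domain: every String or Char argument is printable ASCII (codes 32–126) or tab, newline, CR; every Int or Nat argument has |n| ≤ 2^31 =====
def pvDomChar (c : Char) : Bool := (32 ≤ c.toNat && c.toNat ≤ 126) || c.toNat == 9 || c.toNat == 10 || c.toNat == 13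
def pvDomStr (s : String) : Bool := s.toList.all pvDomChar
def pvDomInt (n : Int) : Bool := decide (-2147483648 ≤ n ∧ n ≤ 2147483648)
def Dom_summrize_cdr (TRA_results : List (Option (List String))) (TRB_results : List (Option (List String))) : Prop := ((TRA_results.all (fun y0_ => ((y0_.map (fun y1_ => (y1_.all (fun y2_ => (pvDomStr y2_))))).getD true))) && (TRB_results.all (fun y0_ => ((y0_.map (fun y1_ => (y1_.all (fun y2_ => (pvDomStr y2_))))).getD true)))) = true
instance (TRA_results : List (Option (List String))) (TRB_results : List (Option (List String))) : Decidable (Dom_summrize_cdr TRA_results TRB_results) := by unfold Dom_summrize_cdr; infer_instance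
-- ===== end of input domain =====

-- B replaces the element-by-element appends into four dict columns by one zip(*rows) transpose
-- of normalized 4-tuple rows (objective: alternative decomposition; return value only, no mutation).

-- ===== PORT A =====
-- A's loop state: the four column lists of one dict (fixed keys, each iteration appends one
-- element to each column; xs[i] ported as PySem.List.pyGet? — none marks the IndexError Pre_ excludes).
def pvAStep (st : List (Option String) × List (Option String) × List (Option String) × List (Option String))
    (o : Option (List String)) :
    List (Option String) × List (Option String) × List (Option String) × List (Option String) :=
  match o with
  | some xs => (st.1 ++ [PySem.List.pyGet? xs 0], st.2.1 ++ [PySem.List.pyGet? xs 1],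
                st.2.2.1 ++ [PySem.List.pyGet? xs 2], st.2.2.2 ++ [PySem.List.pyGet? xs 3])
  | none => (st.1 ++ [none], st.2.1 ++ [none], st.2.2.1 ++ [none], st.2.2.2 ++ [none])

def summrize_cdr (TRA_results : List (Option (List String))) (TRB_results : List (Option (List String))) : (List (String × List (Option String))) × (List (String × List (Option String))) :=
  let ra := TRA_results.foldl pvAStep ([], [], [], [])
  let rb := TRB_results.foldl pvAStep ([], [], [], [])
  ([("Acdr1", ra.1), ("Acdr2", ra.2.1), ("Acdr3", ra.2.2.1), ("Aseq", ra.2.2.2)],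
   [("Bcdr1", rb.1), ("Bcdr2", rb.2.1), ("Bcdr3", rb.2.2.1), ("Bseq", rb.2.2.2)])

-- ===== PORT B =====
def pvNormRow (o : Option (List String)) :
    Option String × Option String × Option String × Option String :=
  match o with
  | some r => (PySem.List.pyGet? r 0, PySem.List.pyGet? r 1, PySem.List.pyGet? r 2, PySem.List.pyGet? r 3)
  | none => (none, none, none, none)

-- zip(*rows) on fixed-arity 4-tuples = the four componentwise projections (exact);
-- the empty-rows branch is B's explicit special case.
def pvColumns (results : List (Option (List String))) :
    List (Option String) × List (Option String) × List (Option String) × List (Option String) :=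
  let rows := results.map pvNormRow
  if rows = [] then ([], [], [], [])
  else (rows.map (·.1), rows.map (·.2.1), rows.map (·.2.2.1), rows.map (·.2.2.2))

def summrize_cdr_alt (TRA_results : List (Option (List String))) (TRB_results : List (Option (List String))) : (List (String × List (Option String))) × (List (String × List (Option String))) :=
  let ca := pvColumns TRA_results
  let cb := pvColumns TRB_results
  ([("Acdr1", ca.1), ("Acdr2", ca.2.1), ("Acdr3", ca.2.2.1), ("Aseq", ca.2.2.2)],
   [("Bcdr1", cb.1), ("Bcdr2", cb.2.1), ("Bcdr3", cb.2.2.1), ("Bseq", cb.2.2.2)])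

-- ===== PRECONDITION & SPEC =====
-- Pre_ excludes exactly the inputs where Python A raises IndexError: a non-None entry with fewer
-- than four elements.
def Pre_summrize_cdr (TRA_results : List (Option (List String))) (TRB_results : List (Option (List String))) : Prop :=
  (∀ o ∈ TRA_results, ∀ xs ∈ o, 4 ≤ xs.length) ∧ (∀ o ∈ TRB_results, ∀ xs ∈ o, 4 ≤ xs.length)
instance (TRA_results : List (Option (List String))) (TRB_results : List (Option (List String))) : Decidable (Pre_summrize_cdr TRA_results TRB_results) := by unfold Pre_summrize_cdr; infer_instance

def pvWitness_summrize_cdr : List (Option (List String)) × List (Option (List String)) :=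
  ([some ["a", "b", "c", "defg"], none], [none, some ["x", "y", "z", "w"]])

def Spec_summrize_cdr (TRA_results : List (Option (List String))) (TRB_results : List (Option (List String))) (out : (List (String × List (Option String))) × (List (String × List (Option String)))) : Prop := out = summrize_cdr_alt TRA_results TRB_results
instance (TRA_results : List (Option (List String))) (TRB_results : List (Option (List String))) (out : (List (String × List (Option String))) × (List (String × List (Option String)))) : Decidable (Spec_summrize_cdr TRA_results TRB_results out) := by unfold Spec_summrize_cdr; infer_instance

-- ===== CLAIM (what is proved, stated in full; the proofs are below) =====
def Claim_equal_summrize_cdr : Prop := ∀ (TRA_results : List (Option (List String))) (TRB_results : List (Option (List String))), Dom_summrize_cdr TRA_results TRB_results → Pre_summrize_cdr TRA_results TRB_results → Spec_summrize_cdr TRA_results TRB_results (summrize_cdr TRA_results TRB_results)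

-- ===== LEMMAS AND PROOFS =====
theorem pvFoldl_eq_cols (l : List (Option (List String)))
    (a b c d : List (Option String)) :
    l.foldl pvAStep (a, b, c, d) =
      (a ++ (l.map pvNormRow).map (·.1), b ++ (l.map pvNormRow).map (·.2.1),
       c ++ (l.map pvNormRow).map (·.2.2.1), d ++ (l.map pvNormRow).map (·.2.2.2)) := by
  induction l generalizing a b c d with
  | nil => simp
  | cons o t ih =>
    cases o <;> simp [pvAStep, pvNormRow, ih]

theorem pvFoldl_eq_columns (l : List (Option (List String))) :
    l.foldl pvAStep ([], [], [], []) = pvColumns l := by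
  rw [pvFoldl_eq_cols]
  unfold pvColumns
  by_cases h : l.map pvNormRow = [] <;> simp [h]

-- ===== VERDICT (by name: the statement is the Claim_ definition above) =====
theorem summrize_cdr_spec : Claim_equal_summrize_cdr := by
  intro TRA TRB _ _
  unfold Spec_summrize_cdr summrize_cdr summrize_cdr_alt
  simp [pvFoldl_eq_columns]
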